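-- pv_equiv track=rewrite | github.com/JuyaoHuang/linglong | migrate_articles.py | migrate_frontmatter
-- ===== SOURCE A (Python) =====
-- from typing import Dict, Any, Optional
--
-- def migrate_frontmatter(frontmatter: Dict[str, Any]) -> tuple[Dict[str, Any], Optional[str]]:
--     """
--     Migrate frontmatter from old format to new format.
--     Returns: (new_frontmatter, sourceLink_content)
--     """
--     new_fm = {}
--     source_link = None
--
--     for key, value in frontmatter.items():
--         # 1. published -> publishDate
--         if key == 'published':
--             new_fm['publishDate'] = value
--         # 3. cover -> heroImage (convert to object format)
--         elif key == 'cover':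
--             # Extract filename from path
--             if value:
--                 # Remove quotes if present
--                 cover_path = value.strip('\'"')
--                 new_fm['heroImage'] = f"{{ src: '{cover_path}', color: '#B8C5D6' }}"
--         # 4. Remove author field (skip it)
--         elif key == 'author':
--             continue
--         # 5. Save sourceLink for later
--         elif key == 'sourceLink':
--             source_link = value.strip('\'"')
--         # Keep other fields
--         else:
--             new_fm[key] = value
--
--     # 2. Add language: 'Chinese' if not present
--     if 'language' not in new_fm:
--         new_fm['language'] = "'Chinese'"
--
--     # 6. Add description: '' if not present (required field)
--     if 'description' not in new_fm:
--         new_fm['description'] = "''"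
--
--     return new_fm, source_link
-- ===== SOURCE B (Python) =====
-- def migrate_frontmatter(frontmatter):
--     items = list(frontmatter.items())
--     # capture sourceLink (dict keys are unique, so the first match is the one)
--     source_link = next((v.strip('\'"') for k, v in items if k == 'sourceLink'), None)
--     # drop author and sourceLink entries
--     items = [(k, v) for k, v in items if k != 'author' and k != 'sourceLink']
--     # rename published -> publishDate
--     items = [('publishDate' if k == 'published' else k, v) for k, v in items]
--     # drop falsy covers, then turn the remaining cover into the heroImage object
--     items = [(k, v) for k, v in items if k != 'cover' or v]
--     items = [('heroImage', "{ src: '%s', color: '#B8C5D6' }" % v.strip('\'"')) if k == 'cover' else (k, v)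
--              for k, v in items]
--     new_fm = dict(items)
--     new_fm.setdefault('language', "'Chinese'")
--     new_fm.setdefault('description', "''")
--     return new_fm, source_link
-- ===== Notes on version B (the rewrite author's own statement) =====
-- stated objective: alternative
-- what changed: B replaces A's single per-item dispatch loop with a side variable by staged whole-list passes: sourceLink is captured by a first-match generator, then separate filter/rename/transform comprehensions implement each migration rule, and the defaults are added with setdefault.
import Mathlib
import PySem

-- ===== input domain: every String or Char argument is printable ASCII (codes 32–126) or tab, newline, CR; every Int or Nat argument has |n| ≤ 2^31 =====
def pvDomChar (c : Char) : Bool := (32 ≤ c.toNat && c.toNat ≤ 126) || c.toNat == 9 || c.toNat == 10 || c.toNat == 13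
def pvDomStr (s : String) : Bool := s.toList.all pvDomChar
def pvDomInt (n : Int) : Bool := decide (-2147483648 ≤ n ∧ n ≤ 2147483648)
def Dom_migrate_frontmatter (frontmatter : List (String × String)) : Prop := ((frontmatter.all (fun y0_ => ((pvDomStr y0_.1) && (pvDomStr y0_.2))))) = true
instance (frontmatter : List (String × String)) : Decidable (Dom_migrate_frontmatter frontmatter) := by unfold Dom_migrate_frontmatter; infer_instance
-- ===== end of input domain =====

-- B replaces A's single dispatch loop by staged whole-list passes (capture sourceLink by first
-- match, then filter, rename, and transform passes, then dict() + setdefault defaults)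
-- (objective: alternative; same cost).


-- ===== PORT A =====
-- the f-string "{ src: '<stripped cover path>', color: '#B8C5D6' }" — identical in A and B
def pvHero (value : String) : String :=
  String.ofList ("{ src: '".toList ++ (PySem.Str.stripChars value "'\"").toList ++ "', color: '#B8C5D6' }".toList)

def pvStepA (st : PySem.Dict String String × Option String) (kv : String × String) :
    PySem.Dict String String × Option String :=
  if kv.1 == "published" then (st.1.insert "publishDate" kv.2, st.2)
  else if kv.1 == "cover" then
    (if kv.2 ≠ "" then st.1.insert "heroImage" (pvHero kv.2) else st.1, st.2)
  else if kv.1 == "author" then st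
  else if kv.1 == "sourceLink" then (st.1, some (PySem.Str.stripChars kv.2 "'\""))
  else (st.1.insert kv.1 kv.2, st.2)

def migrate_frontmatter (frontmatter : List (String × String)) : (List (String × String)) × Option String :=
  let st := frontmatter.foldl pvStepA (PySem.Dict.empty, none)
  let d1 := if st.1.contains "language" then st.1 else st.1.insert "language" "'Chinese'"
  let d2 := if d1.contains "description" then d1 else d1.insert "description" "''"
  (d2.items, st.2)

-- ===== PORT B =====
def migrate_frontmatter_alt (frontmatter : List (String × String)) : (List (String × String)) × Option String :=
  -- next((v.strip(…) for k, v in items if k == 'sourceLink'), None)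
  let source_link := (frontmatter.find? (fun kv => kv.1 == "sourceLink")).map
      (fun kv => PySem.Str.stripChars kv.2 "'\"")
  let items1 := frontmatter.filter (fun kv => kv.1 != "author" && kv.1 != "sourceLink")
  let items2 := items1.map (fun kv => ((if kv.1 == "published" then "publishDate" else kv.1), kv.2))
  let items3 := items2.filter (fun kv => kv.1 != "cover" || kv.2 != "")
  let items4 := items3.map (fun kv => if kv.1 == "cover" then ("heroImage", pvHero kv.2) else kv)
  let new_fm := PySem.Dict.ofList items4
  let d := (new_fm.setdefault "language" "'Chinese'").setdefault "description" "''"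
  (d.items, source_link)

-- ===== PRECONDITION & SPEC =====
-- Pre_ excludes association lists with duplicate keys: A's parameter is a Python dict, which cannot
-- contain them, so their last-wins/first-position behaviour is an artefact of the list representation.
def Pre_migrate_frontmatter (frontmatter : List (String × String)) : Prop :=
  (frontmatter.map Prod.fst).Nodup
instance (frontmatter : List (String × String)) : Decidable (Pre_migrate_frontmatter frontmatter) := by
  unfold Pre_migrate_frontmatter; infer_instance

def pvWitness_migrate_frontmatter : (List (String × String)) :=
  [("published", "2020-01-01"), ("cover", "'img.png'"), ("author", "me"),
   ("sourceLink", "\"http://x\""), ("title", "t")]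

def Spec_migrate_frontmatter (frontmatter : List (String × String)) (out : (List (String × String)) × Option String) : Prop := out = migrate_frontmatter_alt frontmatter
instance (frontmatter : List (String × String)) (out : (List (String × String)) × Option String) : Decidable (Spec_migrate_frontmatter frontmatter out) := by unfold Spec_migrate_frontmatter; infer_instance

-- ===== CLAIM (what is proved, stated in full; the proofs are below) =====
def Claim_equal_migrate_frontmatter : Prop := ∀ (frontmatter : List (String × String)), Dom_migrate_frontmatter frontmatter → Pre_migrate_frontmatter frontmatter → Spec_migrate_frontmatter frontmatter (migrate_frontmatter frontmatter)

-- ===== LEMMAS AND PROOFS =====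

-- per-item contribution of A's dispatch (proof device: what one item adds to the dict)
def pvEntry (key value : String) : List (String × String) :=
  if key == "published" then [("publishDate", value)]
  else if key == "cover" then
    (if value ≠ "" then [("heroImage", pvHero value)] else [])
  else if key == "author" || key == "sourceLink" then []
  else [(key, value)]

-- B's staged passes compute exactly the concatenation of the per-item contributions.
theorem pvPipeline_eq (l : List (String × String)) :
    ((((l.filter (fun kv => kv.1 != "author" && kv.1 != "sourceLink")).map
        (fun kv => ((if kv.1 == "published" then "publishDate" else kv.1), kv.2))).filter
        (fun kv => kv.1 != "cover" || kv.2 != "")).map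
        (fun kv => if kv.1 == "cover" then ("heroImage", pvHero kv.2) else kv))
      = l.flatMap (fun kv => pvEntry kv.1 kv.2) := by
  induction l with
  | nil => rfl
  | cons kv rest ih =>
    obtain ⟨k, v⟩ := kv
    rw [List.flatMap_cons, ← ih]
    by_cases h1 : k = "published"
    · simp [pvEntry, h1]
    · by_cases h2 : k = "cover"
      · by_cases hv : v = "" <;> simp [pvEntry, h2, hv]
      · by_cases h3 : k = "author"
        · simp [pvEntry, h3]
        · by_cases h4 : k = "sourceLink"
          · simp [pvEntry, h4]
          · simp [pvEntry, h1, h2, h3, h4]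

-- The dict component of A's fold is the insert-fold of the per-item contributions.
theorem pvDict_eq (l : List (String × String)) (d : PySem.Dict String String) (sl : Option String) :
    (l.foldl pvStepA (d, sl)).1
      = (l.flatMap (fun kv => pvEntry kv.1 kv.2)).foldl (fun d p => d.insert p.1 p.2) d := by
  induction l generalizing d sl with
  | nil => rfl
  | cons kv rest ih =>
    obtain ⟨k, v⟩ := kv
    rw [List.flatMap_cons, List.foldl_append, List.foldl_cons]
    by_cases h1 : k = "published"
    · have he : pvEntry k v = [("publishDate", v)] := by simp [pvEntry, h1]
      have hs : pvStepA (d, sl) (k, v) = (d.insert "publishDate" v, sl) := by simp [pvStepA, h1]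
      rw [he, hs]; exact ih _ _
    · by_cases h2 : k = "cover"
      · by_cases hv : v = ""
        · have he : pvEntry k v = [] := by simp [pvEntry, h2, hv]
          have hs : pvStepA (d, sl) (k, v) = (d, sl) := by simp [pvStepA, h2, hv]
          rw [he, hs]; exact ih _ _
        · have he : pvEntry k v = [("heroImage", pvHero v)] := by simp [pvEntry, h2, hv]
          have hs : pvStepA (d, sl) (k, v) = (d.insert "heroImage" (pvHero v), sl) := by
            simp [pvStepA, h2, hv]
          rw [he, hs]; exact ih _ _
      · by_cases h3 : k = "author"
        · have he : pvEntry k v = [] := by simp [pvEntry, h3]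
          have hs : pvStepA (d, sl) (k, v) = (d, sl) := by simp [pvStepA, h3]
          rw [he, hs]; exact ih _ _
        · by_cases h4 : k = "sourceLink"
          · have he : pvEntry k v = [] := by simp [pvEntry, h4]
            have hs : pvStepA (d, sl) (k, v) = (d, some (PySem.Str.stripChars v "'\"")) := by
              simp [pvStepA, h4]
            rw [he, hs]; exact ih _ _
          · have he : pvEntry k v = [(k, v)] := by simp [pvEntry, h1, h2, h3, h4]
            have hs : pvStepA (d, sl) (k, v) = (d.insert k v, sl) := by
              simp [pvStepA, h1, h2, h3, h4]
            rw [he, hs]; exact ih _ _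

-- If "sourceLink" is not among the keys, the fold leaves the side variable unchanged.
theorem pvSL_none (l : List (String × String)) (d : PySem.Dict String String) (sl : Option String)
    (h : "sourceLink" ∉ l.map Prod.fst) :
    (l.foldl pvStepA (d, sl)).2 = sl := by
  induction l generalizing d sl with
  | nil => rfl
  | cons kv rest ih =>
    obtain ⟨k, v⟩ := kv
    simp only [List.map_cons, List.mem_cons] at h
    push Not at h
    simp only [List.foldl_cons, pvStepA]
    by_cases h1 : k = "published"
    · simpa [h1] using ih _ _ h.2
    · by_cases h2 : k = "cover"
      · by_cases hv : v = "" <;> simp [h2, hv] <;> exact ih _ _ h.2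
      · by_cases h3 : k = "author"
        · simpa [h1, h2, h3] using ih _ _ h.2
        · have h4 : k ≠ "sourceLink" := fun hk => h.1 hk.symm
          simp [h1, h2, h3, h4]
          exact ih _ _ h.2

-- Under unique keys, A's side variable is B's first-match find? (stripped).
theorem pvSL_eq (l : List (String × String)) (d : PySem.Dict String String)
    (h : (l.map Prod.fst).Nodup) :
    (l.foldl pvStepA (d, none)).2
      = (l.find? (fun kv => kv.1 == "sourceLink")).map (fun kv => PySem.Str.stripChars kv.2 "'\"") := by
  induction l generalizing d with
  | nil => rfl
  | cons kv rest ih =>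
    obtain ⟨k, v⟩ := kv
    simp only [List.map_cons, List.nodup_cons] at h
    simp only [List.foldl_cons, pvStepA, List.find?_cons]
    by_cases h4 : k = "sourceLink"
    · have hn : "sourceLink" ∉ rest.map Prod.fst := by simpa [h4] using h.1
      simp [h4, pvSL_none rest _ _ hn]
    · have hk : (k == "sourceLink") = false := by simp [h4]
      by_cases h1 : k = "published"
      · simpa [h1, hk] using ih _ h.2
      · by_cases h2 : k = "cover"
        · by_cases hv : v = "" <;> simp [h2, hv] <;> exact ih _ h.2
        · by_cases h3 : k = "author"
          · simpa [h1, h2, h3, hk] using ih _ h.2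
          · simp [h1, h2, h3, hk]
            exact ih _ h.2

-- ===== VERDICT (by name: the statement is the Claim_ definition above) =====
theorem migrate_frontmatter_spec : Claim_equal_migrate_frontmatter := by
  intro fm _ hpre
  unfold Spec_migrate_frontmatter migrate_frontmatter migrate_frontmatter_alt
  have hd := pvDict_eq fm PySem.Dict.empty none
  have hs := pvSL_eq fm PySem.Dict.empty hpre
  have hof : PySem.Dict.ofList
        ((((fm.filter (fun kv => kv.1 != "author" && kv.1 != "sourceLink")).map
          (fun kv => ((if kv.1 == "published" then "publishDate" else kv.1), kv.2))).filter
          (fun kv => kv.1 != "cover" || kv.2 != "")).map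
          (fun kv => if kv.1 == "cover" then ("heroImage", pvHero kv.2) else kv))
      = (fm.flatMap (fun kv => pvEntry kv.1 kv.2)).foldl (fun d p => d.insert p.1 p.2) PySem.Dict.empty := by
    rw [pvPipeline_eq]; rfl
  simp only [hof, ← hd, hs]
  congr 1
  -- the two "add default if absent" forms coincide (setdefault vs if-contains)
  set d0 := (fm.foldl pvStepA (PySem.Dict.empty, none)).1
  have e1 : (if d0.contains "language" then d0 else d0.insert "language" "'Chinese'")
      = d0.setdefault "language" "'Chinese'" := by
    by_cases hc : d0.contains "language" = true
    · simp [hc, PySem.Dict.setdefault_of_contains _ _ hc]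
    · simp at hc
      simp [hc, PySem.Dict.setdefault_of_not_contains _ _ hc]
  rw [e1]
  set d1 := d0.setdefault "language" "'Chinese'"
  by_cases hc : d1.contains "description" = true
  · simp [hc, PySem.Dict.setdefault_of_contains _ _ hc]
  · simp at hc
    simp [hc, PySem.Dict.setdefault_of_not_contains _ _ hc]
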